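-- pv_equiv track=rewrite | github.com/jrezin1201/rcw-python-full-bid | app/services/takeoff_normalizer.py | _is_total_row
-- ===== SOURCE A (Python) =====
-- def _is_total_row(classification: str) -> bool:
--     """
--     Detect if a classification indicates a total/subtotal row.
--     """
--     total_indicators = [
--         'total', 'subtotal', 'sub-total', 'grand total',
--         'sum', 'summary', 'aggregate'
--     ]
--
--     class_lower = classification.lower().strip()
--
--     # Check if the entire classification is just a total indicator
--     if class_lower in total_indicators:
--         return True
--
--     # Check if it starts with a total indicator
--     for indicator in total_indicators:
--         if class_lower.startswith(indicator + ' ') or class_lower.startswith(indicator + ':'):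
--             return True
--
--     return False
-- ===== SOURCE B (Python) =====
-- _INDICATORS = frozenset((
--     'total', 'subtotal', 'sub-total', 'grand total',
--     'sum', 'summary', 'aggregate'
-- ))
--
-- def _is_total_row(classification: str) -> bool:
--     # Scan the string itself: at every boundary (a ' ' or ':'), test whether the
--     # prefix before it is a known indicator; finally test the whole string.
--     s = classification.lower().strip()
--     for i, ch in enumerate(s):
--         if ch in ' :' and s[:i] in _INDICATORS:
--             return True
--     return s in _INDICATORS
-- ===== Notes on version B (the rewrite author's own statement) =====
-- stated objective: alternative
-- what changed: Inverts the traversal: instead of looping over the seven indicators testing concatenated prefixes, B scans the normalized string once and at each space-or-colon boundary (and at the end) checks the preceding prefix against a frozenset of indicators.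
import Mathlib
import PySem

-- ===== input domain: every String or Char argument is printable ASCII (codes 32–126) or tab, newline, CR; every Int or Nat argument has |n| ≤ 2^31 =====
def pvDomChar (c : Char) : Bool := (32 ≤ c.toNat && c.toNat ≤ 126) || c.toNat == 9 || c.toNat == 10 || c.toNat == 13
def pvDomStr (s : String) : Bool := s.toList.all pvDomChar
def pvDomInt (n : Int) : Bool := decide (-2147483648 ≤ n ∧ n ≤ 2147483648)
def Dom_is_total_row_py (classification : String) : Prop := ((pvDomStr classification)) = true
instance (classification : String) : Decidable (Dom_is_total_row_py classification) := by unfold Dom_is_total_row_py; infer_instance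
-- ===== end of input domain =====

-- B inverts the traversal: it scans the normalized string once and checks the prefix before
-- each ' '/':' boundary (and the whole string) against a set of indicators (alternative).

-- ===== PORT A =====
def totalIndicatorsA : List (List Char) :=
  ["total".toList, "subtotal".toList, "sub-total".toList, "grand total".toList,
   "sum".toList, "summary".toList, "aggregate".toList]

def is_total_row_py (classification : String) : Bool :=
  let class_lower := PySem.Chars.strip (PySem.Chars.lower classification.toList)
  if totalIndicatorsA.contains class_lower then true
  else
    totalIndicatorsA.any (fun indicator =>
      PySem.Chars.startswith class_lower (indicator ++ [' ']) ||
      PySem.Chars.startswith class_lower (indicator ++ [':']))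

-- ===== PORT B =====
def indicatorSetB : List (List Char) :=
  ["total".toList, "subtotal".toList, "sub-total".toList, "grand total".toList,
   "sum".toList, "summary".toList, "aggregate".toList]

-- the `for i, ch in enumerate(s)` loop with early return; `rest` is the unscanned suffix s.drop i
def bLoop (s : List Char) : Nat → List Char → Bool
  | _, [] => indicatorSetB.contains s
  | i, c :: rest =>
    if (c == ' ' || c == ':') && indicatorSetB.contains (s.take i) then true
    else bLoop s (i + 1) rest

def is_total_row_py_alt (classification : String) : Bool :=
  let s := PySem.Chars.strip (PySem.Chars.lower classification.toList)
  bLoop s 0 s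

-- ===== PRECONDITION & SPEC =====
def Spec_is_total_row_py (classification : String) (out : Bool) : Prop := out = is_total_row_py_alt classification
instance (classification : String) (out : Bool) : Decidable (Spec_is_total_row_py classification out) := by unfold Spec_is_total_row_py; infer_instance

-- ===== CLAIM =====
def Claim_equal_is_total_row_py : Prop := ∀ (classification : String), Dom_is_total_row_py classification → Spec_is_total_row_py classification (is_total_row_py classification)

-- ===== LEMMAS AND PROOFS =====

lemma prefix_snoc_iff (p : List Char) (c : Char) (t : List Char) :
    (p ++ [c]) <+: t ↔ p <+: t ∧ t[p.length]? = some c := by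
  induction p generalizing t with
  | nil =>
    cases t with
    | nil => simp
    | cons x xs => simp [List.prefix_cons_iff, eq_comm]
  | cons a p ih =>
    cases t with
    | nil => simp
    | cons x xs =>
      simp only [List.cons_append, List.cons_prefix_cons, List.length_cons,
        List.getElem?_cons_succ, ih]
      tauto

-- characterization of A's result
lemma A_char (t : List Char) :
    (totalIndicatorsA.contains t ||
      totalIndicatorsA.any (fun p => PySem.Chars.startswith t (p ++ [' ']) ||
                                     PySem.Chars.startswith t (p ++ [':']))) = true
    ↔ ∃ p ∈ totalIndicatorsA, p <+: t ∧
        (t.length = p.length ∨ t[p.length]? = some ' ' ∨ t[p.length]? = some ':') := by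
  simp only [Bool.or_eq_true, List.contains_iff_exists_mem_beq, List.any_eq_true,
    beq_iff_eq, PySem.Chars.startswith_iff, prefix_snoc_iff]
  constructor
  · rintro (⟨p, hp, rfl⟩ | ⟨p, hp, (⟨h1, h2⟩ | ⟨h1, h2⟩)⟩)
    · exact ⟨_, hp, List.prefix_refl _, Or.inl rfl⟩
    · exact ⟨p, hp, h1, Or.inr (Or.inl h2)⟩
    · exact ⟨p, hp, h1, Or.inr (Or.inr h2)⟩
  · rintro ⟨p, hp, h1, (hl | h2 | h2)⟩
    · exact Or.inl ⟨p, hp, (h1.eq_of_length hl.symm).symm⟩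
    · exact Or.inr ⟨p, hp, Or.inl ⟨h1, h2⟩⟩
    · exact Or.inr ⟨p, hp, Or.inr ⟨h1, h2⟩⟩

-- characterization of B's loop
lemma bLoop_iff (s : List Char) (i : Nat) (rest : List Char) :
    bLoop s i rest = true ↔
      (∃ j, ∃ c, rest[j]? = some c ∧ (c = ' ' ∨ c = ':') ∧
         indicatorSetB.contains (s.take (i + j)) = true) ∨
      indicatorSetB.contains s = true := by
  induction rest generalizing i with
  | nil => simp [bLoop]
  | cons c rest ih =>
    simp only [bLoop]
    split_ifs with h
    · simp only [Bool.and_eq_true, Bool.or_eq_true, beq_iff_eq] at h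
      constructor
      · intro _
        exact Or.inl ⟨0, c, by simp, h.1, by simpa using h.2⟩
      · intro _; rfl
    · rw [Bool.not_eq_true] at h
      rw [ih]
      constructor
      · rintro (⟨j, d, hj, hd, hmem⟩ | hs)
        · exact Or.inl ⟨j + 1, d, by simpa using hj, hd, by
            have : i + 1 + j = i + (j + 1) := by omega
            rwa [this] at hmem⟩
        · exact Or.inr hs
      · rintro (⟨j, d, hj, hd, hmem⟩ | hs)
        · cases j with
          | zero =>
            exfalso
            simp only [List.getElem?_cons_zero, Option.some.injEq] at hj
            rw [← hj] at hd
            have hcond : ((c == ' ' || c == ':') && indicatorSetB.contains (s.take i)) = true := by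
              simp only [Bool.and_eq_true, Bool.or_eq_true, beq_iff_eq]
              exact ⟨hd, by simpa using hmem⟩
            rw [h] at hcond; exact Bool.false_ne_true hcond
          | succ j =>
            refine Or.inl ⟨j, d, by simpa using hj, hd, ?_⟩
            have : i + (j + 1) = i + 1 + j := by omega
            rwa [this] at hmem
        · exact Or.inr hs

lemma B_char (t : List Char) :
    bLoop t 0 t = true ↔ ∃ p ∈ indicatorSetB, p <+: t ∧
        (t.length = p.length ∨ t[p.length]? = some ' ' ∨ t[p.length]? = some ':') := by
  rw [bLoop_iff]
  simp only [List.contains_iff_exists_mem_beq, beq_iff_eq, Nat.zero_add]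
  constructor
  · rintro (⟨j, c, hj, hc, p, hp, hpt⟩ | ⟨p, hp, rfl⟩)
    · have hjlt : j < t.length := (List.getElem?_eq_some_iff.mp hj).1
      have htake : t.take j = p := hpt
      have hplen : p.length = j := by
        rw [← htake]; simp [Nat.min_eq_left (Nat.le_of_lt hjlt)]
      refine ⟨p, hp, ?_, ?_⟩
      · rw [← htake]; exact List.take_prefix _ _
      · rw [hplen, hj]
        rcases hc with rfl | rfl
        · exact Or.inr (Or.inl rfl)
        · exact Or.inr (Or.inr rfl)
    · exact ⟨t, hp, List.prefix_refl _, Or.inl rfl⟩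
  · rintro ⟨p, hp, hpre, (hl | h2 | h2)⟩
    · exact Or.inr ⟨p, hp, (hpre.eq_of_length hl.symm).symm⟩
    · exact Or.inl ⟨p.length, ' ', h2, Or.inl rfl,
        p, hp, (List.prefix_iff_eq_take.mp hpre).symm⟩
    · exact Or.inl ⟨p.length, ':', h2, Or.inr rfl,
        p, hp, (List.prefix_iff_eq_take.mp hpre).symm⟩

lemma or_eq_false_parts {a b : Bool} (h : ¬ (a || b) = true) : a = false ∧ b = false := by
  cases a <;> cases b <;> simp_all

-- ===== VERDICT =====
theorem is_total_row_py_spec : Claim_equal_is_total_row_py := by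
  intro classification _
  unfold Spec_is_total_row_py is_total_row_py is_total_row_py_alt
  simp only []
  set t := PySem.Chars.strip (PySem.Chars.lower classification.toList) with ht
  have hsets : indicatorSetB = totalIndicatorsA := rfl
  have hA := A_char t
  have hB := B_char t
  rw [hsets] at hB
  by_cases h : ∃ p ∈ totalIndicatorsA, p <+: t ∧
      (t.length = p.length ∨ t[p.length]? = some ' ' ∨ t[p.length]? = some ':')
  · have e1 : (totalIndicatorsA.contains t ||
        totalIndicatorsA.any (fun p => PySem.Chars.startswith t (p ++ [' ']) ||
          PySem.Chars.startswith t (p ++ [':']))) = true := hA.mpr h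
    have e2 : bLoop t 0 t = true := hB.mpr h
    rw [e2]
    cases hc : totalIndicatorsA.contains t
    · rw [hc, Bool.false_or] at e1
      simp [e1]
    · simp
  · have e2 : bLoop t 0 t = false := by
      cases hb : bLoop t 0 t
      · rfl
      · exact absurd (hB.mp hb) h
    rw [e2]
    obtain ⟨hc, ha⟩ := or_eq_false_parts (fun hh => h (hA.mp hh))
    rw [hc, ha]
    simp
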